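-- pv_equiv track=rewrite | github.com/pypi-data/pypi-mirror-403 | packages/ontos/ontos-3.1.1-py3-none-any.whl/ontos/commands/promote.py | fuzzy_match_ids
-- ===== SOURCE A (Python) =====
-- from typing import List, Optional, Tuple
--
-- def fuzzy_match_ids(query: str, all_ids: List[str]) -> List[str]:
--     """Simple fuzzy matching for document IDs."""
--     query_lower = query.lower()
--     if query in all_ids:
--         return [query]
--     prefix_matches = [id for id in all_ids if id.lower().startswith(query_lower)]
--     if prefix_matches:
--         return prefix_matches[:5]
--     substring_matches = [id for id in all_ids if query_lower in id.lower()]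
--     return substring_matches[:5]
-- ===== SOURCE B (Python) =====
-- def fuzzy_match_ids(query, all_ids):
--     """Single pass over all_ids maintaining exact flag, prefix and substring matches."""
--     query_lower = query.lower()
--     exact = False
--     prefix = []
--     substring = []
--     for id in all_ids:
--         if id == query:
--             exact = True
--         lo = id.lower()
--         if lo.startswith(query_lower):
--             prefix.append(id)
--         if query_lower in lo:
--             substring.append(id)
--     if exact:
--         return [query]
--     if prefix:
--         return prefix[:5]
--     return substring[:5]
-- ===== Notes on version B (the rewrite author's own statement) =====
-- stated objective: alternative
-- what changed: Three separate scans of all_ids (membership test, prefix comprehension, substring comprehension) are replaced by one loop that simultaneously maintains an exact-match flag and the prefix/substring match lists, with the priority decision taken once after the loop.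
import Mathlib
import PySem

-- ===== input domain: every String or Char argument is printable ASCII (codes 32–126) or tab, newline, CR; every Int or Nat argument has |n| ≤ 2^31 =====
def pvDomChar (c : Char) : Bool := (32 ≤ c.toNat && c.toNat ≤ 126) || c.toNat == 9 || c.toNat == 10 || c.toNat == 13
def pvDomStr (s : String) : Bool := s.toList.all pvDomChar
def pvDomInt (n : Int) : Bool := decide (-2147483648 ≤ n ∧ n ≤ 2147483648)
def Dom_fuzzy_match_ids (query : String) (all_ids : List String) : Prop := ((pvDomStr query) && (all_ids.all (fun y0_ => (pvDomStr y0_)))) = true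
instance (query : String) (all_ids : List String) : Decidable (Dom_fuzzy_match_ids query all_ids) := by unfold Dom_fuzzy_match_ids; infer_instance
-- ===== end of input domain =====

-- B replaces A's three separate scans of all_ids by one loop maintaining an exact flag
-- and the prefix/substring match lists (objective: alternative decomposition, same cost).


-- ===== PORT A =====
def fuzzy_match_ids (query : String) (all_ids : List String) : List String :=
  let query_lower := PySem.Str.lower query
  if all_ids.contains query then [query]
  else
    let prefix_matches := all_ids.filter (fun id => PySem.Str.startswith (PySem.Str.lower id) query_lower)
    if prefix_matches ≠ [] then PySem.List.slice prefix_matches none (some 5)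
    else
      let substring_matches := all_ids.filter (fun id => PySem.Str.isIn query_lower (PySem.Str.lower id))
      PySem.List.slice substring_matches none (some 5)

-- ===== PORT B =====
-- the single loop of Source B: state (exact flag, prefix matches, substring matches)
def pvStep (query query_lower : String) (st : Bool × List String × List String)
    (id : String) : Bool × List String × List String :=
  let st := if id == query then (true, st.2.1, st.2.2) else st
  let lo := PySem.Str.lower id
  let st := if PySem.Str.startswith lo query_lower then (st.1, st.2.1 ++ [id], st.2.2) else st
  if PySem.Str.isIn query_lower lo then (st.1, st.2.1, st.2.2 ++ [id]) else st

def pvScan (query query_lower : String) (acc : Bool × List String × List String)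
    (ids : List String) : Bool × List String × List String :=
  ids.foldl (pvStep query query_lower) acc

def fuzzy_match_ids_alt (query : String) (all_ids : List String) : List String :=
  let query_lower := PySem.Str.lower query
  let st := pvScan query query_lower (false, [], []) all_ids
  if st.1 then [query]
  else if st.2.1 ≠ [] then PySem.List.slice st.2.1 none (some 5)
  else PySem.List.slice st.2.2 none (some 5)

-- ===== PRECONDITION & SPEC =====
def Spec_fuzzy_match_ids (query : String) (all_ids : List String) (out : List String) : Prop := out = fuzzy_match_ids_alt query all_ids
instance (query : String) (all_ids : List String) (out : List String) : Decidable (Spec_fuzzy_match_ids query all_ids out) := by unfold Spec_fuzzy_match_ids; infer_instance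

-- ===== CLAIM (what is proved, stated in full; the proofs are below) =====
def Claim_equal_fuzzy_match_ids : Prop := ∀ (query : String) (all_ids : List String), Dom_fuzzy_match_ids query all_ids → Spec_fuzzy_match_ids query all_ids (fuzzy_match_ids query all_ids)

-- ===== LEMMAS AND PROOFS =====
theorem pvStep_eq (query query_lower : String) (e : Bool) (p s : List String) (x : String) :
    pvStep query query_lower (e, p, s) x =
      (e || (x == query),
       p ++ if PySem.Str.startswith (PySem.Str.lower x) query_lower then [x] else [],
       s ++ if PySem.Str.isIn query_lower (PySem.Str.lower x) then [x] else []) := by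
  unfold pvStep
  split_ifs with h1 h2 h3 h4 h5 h6 h7 <;> simp_all

theorem pvScan_eq (query query_lower : String) (e : Bool) (p s : List String)
    (ids : List String) :
    pvScan query query_lower (e, p, s) ids =
      (e || ids.any (fun id => id == query),
       p ++ ids.filter (fun id => PySem.Str.startswith (PySem.Str.lower id) query_lower),
       s ++ ids.filter (fun id => PySem.Str.isIn query_lower (PySem.Str.lower id))) := by
  induction ids generalizing e p s with
  | nil => simp [pvScan]
  | cons x xs ih =>
    have step : pvScan query query_lower (e, p, s) (x :: xs)
        = pvScan query query_lower (pvStep query query_lower (e, p, s) x) xs := rfl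
    rw [step, pvStep_eq, ih]
    simp only [List.any_cons, List.filter_cons, Bool.or_assoc, Prod.mk.injEq]
    refine ⟨trivial, ?_, ?_⟩ <;> split_ifs <;> simp

theorem contains_eq_any (l : List String) (q : String) :
    l.contains q = l.any (fun id => id == q) := by
  rw [Bool.eq_iff_iff, List.contains_iff_mem, List.any_eq_true]
  constructor
  · intro h; exact ⟨q, h, by simp⟩
  · rintro ⟨x, hx, he⟩; rw [beq_iff_eq] at he; subst he; exact hx

theorem fuzzy_match_ids_eq (query : String) (all_ids : List String) :
    fuzzy_match_ids query all_ids = fuzzy_match_ids_alt query all_ids := by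
  simp only [fuzzy_match_ids, fuzzy_match_ids_alt, pvScan_eq, contains_eq_any,
    Bool.false_or, List.nil_append]

-- ===== VERDICT (by name: the statement is the Claim_ definition above) =====
theorem fuzzy_match_ids_spec : Claim_equal_fuzzy_match_ids := by
  intro query all_ids _
  exact fuzzy_match_ids_eq query all_ids
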